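-- pv_equiv track=rewrite | github.com/Partlo/C4-DE | c4de/sources/infoboxer.py | separate_template_parameters
-- ===== SOURCE A (Python) =====
-- def separate_template_parameters(text):
--     lines = []
--     current_line = ""
--     bc, sc = 0, 0
--     for c in text:
--         if sc == 0 and bc == 0 and c == "|":
--             lines.append(current_line)
--             current_line = f"{c}"
--             continue
--
--         if c == "{":
--             bc += 1
--         elif c == "}":
--             bc -= 1
--         elif c == "[":
--             sc += 1
--         elif c == "]":
--             sc -= 1
--         current_line += c
--     lines.append(current_line)
--     return lines
-- ===== SOURCE B (Python) =====
-- def separate_template_parameters(text):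
--     # Phase 1: one scan recording the indices of top-level pipes.
--     splits = []
--     bc, sc = 0, 0
--     for i, c in enumerate(text):
--         if bc == 0 and sc == 0 and c == "|":
--             splits.append(i)
--         elif c == "{":
--             bc += 1
--         elif c == "}":
--             bc -= 1
--         elif c == "[":
--             sc += 1
--         elif c == "]":
--             sc -= 1
--     # Phase 2: build the segments by slicing between consecutive split indices.
--     segments = []
--     start = 0
--     for j in splits:
--         segments.append(text[start:j])
--         start = j
--     segments.append(text[start:])
--     return segments
-- ===== Notes on version B (the rewrite author's own statement) =====
-- stated objective: alternative
-- what changed: B first records the indices of top-level pipes in one scan, then produces each parameter with a single slice between consecutive indices, instead of growing the current segment character by character.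
import Mathlib
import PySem

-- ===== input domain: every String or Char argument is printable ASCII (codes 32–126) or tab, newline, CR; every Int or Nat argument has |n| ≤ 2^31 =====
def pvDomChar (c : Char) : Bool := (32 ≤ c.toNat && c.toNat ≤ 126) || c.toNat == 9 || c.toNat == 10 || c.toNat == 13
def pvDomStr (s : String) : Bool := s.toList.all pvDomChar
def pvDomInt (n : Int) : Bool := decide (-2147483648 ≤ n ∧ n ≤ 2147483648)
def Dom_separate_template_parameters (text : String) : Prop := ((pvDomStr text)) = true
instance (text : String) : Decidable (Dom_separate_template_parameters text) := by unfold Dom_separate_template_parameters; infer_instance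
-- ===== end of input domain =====

-- B replaces A's per-character accumulation by one scan collecting top-level pipe indices
-- followed by slicing between consecutive indices (objective: alternative decomposition).

-- brace/bracket-depth update shared by both Pythons' identical elif chain
def pvUpd (c : Char) (bc sc : Int) : Int × Int :=
  if c == '{' then (bc + 1, sc)
  else if c == '}' then (bc - 1, sc)
  else if c == '[' then (bc, sc + 1)
  else if c == ']' then (bc, sc - 1)
  else (bc, sc)

-- ===== PORT A =====
-- A's loop: lines / current_line accumulators (segments kept as List Char; String.ofList at the end)
def pvALoop : List Char → List (List Char) → List Char → Int → Int → List (List Char)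
  | [], lines, cur, _, _ => lines ++ [cur]
  | c :: rest, lines, cur, bc, sc =>
    if sc == 0 && bc == 0 && c == '|' then
      pvALoop rest (lines ++ [cur]) [c] bc sc
    else
      let p := pvUpd c bc sc
      pvALoop rest lines (cur ++ [c]) p.1 p.2

def separate_template_parameters (text : String) : List String :=
  (pvALoop text.toList [] [] 0 0).map String.ofList

-- ===== PORT B =====
-- Phase 1: indices of top-level pipes (i is the enumerate counter)
def pvBSplits : List Char → Nat → Int → Int → List Nat
  | [], _, _, _ => []
  | c :: rest, i, bc, sc =>
    if bc == 0 && sc == 0 && c == '|' then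
      i :: pvBSplits rest (i + 1) bc sc
    else
      let p := pvUpd c bc sc
      pvBSplits rest (i + 1) p.1 p.2

-- Phase 2: text[start:j] for consecutive split indices, then the final text[start:].
-- Slices are exact as drop/take here: 0 ≤ start ≤ j ≤ len always holds (split indices are increasing positions in text).
def pvBSegs (chars : List Char) : Nat → List Nat → List (List Char)
  | start, [] => [chars.drop start]
  | start, j :: rest => ((chars.drop start).take (j - start)) :: pvBSegs chars j rest

def separate_template_parameters_alt (text : String) : List String :=
  (pvBSegs text.toList 0 (pvBSplits text.toList 0 0 0)).map String.ofList

-- ===== PRECONDITION & SPEC =====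
def Spec_separate_template_parameters (text : String) (out : List String) : Prop := out = separate_template_parameters_alt text
instance (text : String) (out : List String) : Decidable (Spec_separate_template_parameters text out) := by unfold Spec_separate_template_parameters; infer_instance

-- ===== CLAIM (what is proved, stated in full; the proofs are below) =====
def Claim_equal_separate_template_parameters : Prop := ∀ (text : String), Dom_separate_template_parameters text → Spec_separate_template_parameters text (separate_template_parameters text)

-- ===== LEMMAS AND PROOFS =====

-- common reference: the segment list, recursively (head gets chars prepended)
def pvPre (cur : List Char) : List (List Char) → List (List Char)
  | [] => [cur]
  | h :: t => (cur ++ h) :: t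

def pvF : List Char → Int → Int → List (List Char)
  | [], _, _ => [[]]
  | c :: rest, bc, sc =>
    if sc == 0 && bc == 0 && c == '|' then
      [] :: pvPre [c] (pvF rest bc sc)
    else
      let p := pvUpd c bc sc
      pvPre [c] (pvF rest p.1 p.2)

theorem pvPre_assoc (a b : List Char) (xs : List (List Char)) :
    pvPre (a ++ b) xs = pvPre a (pvPre b xs) := by
  cases xs <;> simp [pvPre]

theorem pvPre_nil_cons (cur : List Char) (xs : List (List Char)) :
    pvPre cur ([] :: xs) = cur :: xs := by
  simp [pvPre]

theorem pvALoop_eq (chars : List Char) : ∀ lines cur bc sc,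
    pvALoop chars lines cur bc sc = lines ++ pvPre cur (pvF chars bc sc) := by
  induction chars with
  | nil => intro lines cur bc sc; simp [pvALoop, pvF, pvPre]
  | cons c rest ih =>
    intro lines cur bc sc
    by_cases h : (sc == 0 && bc == 0 && c == '|') = true
    · simp only [pvALoop, pvF, h, if_pos, ih, pvPre_nil_cons]
      cases hf : pvF rest bc sc <;> simp [pvPre]
    · simp only [pvALoop, pvF, h, Bool.false_eq_true, if_false, ih, pvPre_assoc]

theorem pvF_ne_nil (chars : List Char) (bc sc : Int) : pvF chars bc sc ≠ [] := by
  cases chars with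
  | nil => simp [pvF]
  | cons c rest =>
    by_cases h : (sc == 0 && bc == 0 && c == '|') = true
    · simp [pvF, h]
    · simp only [pvF, h, Bool.false_eq_true, if_false]
      cases hf : pvF rest (pvUpd c bc sc).1 (pvUpd c bc sc).2 <;> simp [pvPre]

-- every index produced by pvBSplits is ≥ the starting counter
theorem pvBSplits_ge (chars : List Char) : ∀ i bc sc j, j ∈ pvBSplits chars i bc sc → i ≤ j := by
  induction chars with
  | nil => intro i bc sc j h; simp [pvBSplits] at h
  | cons c rest ih =>
    intro i bc sc j h
    by_cases hc : (bc == 0 && sc == 0 && c == '|') = true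
    · simp only [pvBSplits, hc, if_pos, List.mem_cons] at h
      rcases h with h | h
      · omega
      · have := ih _ _ _ _ h; omega
    · simp only [pvBSplits, hc, Bool.false_eq_true, if_false] at h
      have := ih _ _ _ _ h; omega

-- stepping the slice start past one character prepends it to the head segment
theorem pvBSegs_step (L : List Char) (c : Char) (rest : List Char) (i : Nat)
    (hd : L.drop i = c :: rest) (S : List Nat) (hS : ∀ j ∈ S, i + 1 ≤ j) :
    pvBSegs L i S = pvPre [c] (pvBSegs L (i + 1) S) := by
  have hdrop : L.drop (i + 1) = rest := by
    simpa [List.drop_drop] using congrArg (List.drop 1) hd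
  cases S with
  | nil => simp [pvBSegs, pvPre, hd, hdrop]
  | cons j t =>
    have hj : i + 1 ≤ j := hS j (by simp)
    simp only [pvBSegs, pvPre, hd, hdrop]
    have : j - i = (j - (i + 1)) + 1 := by omega
    rw [this]
    simp [List.take_succ_cons]

theorem pvBSegs_eq (chars : List Char) : ∀ (L : List Char) i bc sc, L.drop i = chars →
    pvBSegs L i (pvBSplits chars i bc sc) = pvF chars bc sc := by
  induction chars with
  | nil => intro L i bc sc h; simp [pvBSplits, pvBSegs, pvF, h]
  | cons c rest ih =>
    intro L i bc sc h
    have hdrop : L.drop (i + 1) = rest := by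
      simpa [List.drop_drop] using congrArg (List.drop 1) h
    by_cases hc : (bc == 0 && sc == 0 && c == '|') = true
    · have hc' : (sc == 0 && bc == 0 && c == '|') = true := by
        simp only [Bool.and_eq_true] at hc ⊢; tauto
      simp only [pvBSplits, pvF, hc, hc', if_pos]
      simp only [pvBSegs, h]
      rw [pvBSegs_step L c rest i h _ (fun j hj => pvBSplits_ge rest (i+1) bc sc j hj),
        ih L (i+1) bc sc hdrop]
      simp
    · have hc' : ¬ (sc == 0 && bc == 0 && c == '|') = true := by
        simp only [Bool.and_eq_true] at hc ⊢; tauto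
      simp only [pvBSplits, pvF, hc, hc', Bool.false_eq_true, if_false]
      rw [pvBSegs_step L c rest i h _
          (fun j hj => pvBSplits_ge rest (i+1) (pvUpd c bc sc).1 (pvUpd c bc sc).2 j hj),
        ih L (i+1) (pvUpd c bc sc).1 (pvUpd c bc sc).2 hdrop]

-- ===== VERDICT (by name: the statement is the Claim_ definition above) =====
theorem separate_template_parameters_spec : Claim_equal_separate_template_parameters := by
  intro text _
  unfold Spec_separate_template_parameters separate_template_parameters separate_template_parameters_alt
  rw [pvALoop_eq, pvBSegs_eq text.toList text.toList 0 0 0 (by simp)]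
  cases hf : pvF text.toList 0 0 with
  | nil => exact absurd hf (pvF_ne_nil _ _ _)
  | cons h t => simp [pvPre]
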